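-- pv_equiv track=rewrite | github.com/MrBrantCode/unitest_baseline | mut_generate/mist_train_cf/cf_29228/solution.py | find_stride_blocks
-- ===== SOURCE A (Python) =====
-- def find_stride_blocks(numbers):
--     blocks = []
--     start = 0
--     stride = numbers[1] - numbers[0]
--
--     for i in range(1, len(numbers)):
--         if numbers[i] - numbers[i-1] != stride:
--             blocks.append((start, i-1, stride))
--             start = i
--             stride = numbers[i] - numbers[i-1]
--
--     blocks.append((start, len(numbers)-1, stride))
--     return blocks
-- ===== SOURCE B (Python) =====
-- def find_stride_blocks(numbers):
--     # Phase 1: run-length encode the list of consecutive differences.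
--     runs = []
--     cur = None  # (diff value, run length)
--     for j in range(1, len(numbers)):
--         d = numbers[j] - numbers[j - 1]
--         if cur is not None and cur[0] == d:
--             cur = (d, cur[1] + 1)
--         else:
--             if cur is not None:
--                 runs.append(cur)
--             cur = (d, 1)
--     if cur is not None:
--         runs.append(cur)
--     # Phase 2: rebuild index blocks from run lengths (first block owns element 0 too).
--     blocks = []
--     pos = 1
--     for v, run in runs:
--         s = 0 if not blocks else pos
--         blocks.append((s, pos + run - 1, v))
--         pos += run
--     return blocks
-- ===== Notes on version B (the rewrite author's own statement) =====
-- stated objective: alternative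
-- what changed: A's single stateful scan (blocks/start/stride mutated in one loop) is replaced by a two-phase decomposition: run-length encode the list of consecutive differences, then rebuild the index blocks from the run lengths.
-- crash fix: On lists with fewer than two elements A raises IndexError at numbers[1]; B returns the empty block list []. — e.g. on find_stride_blocks([7]): A raises IndexError, B returns []
import Mathlib
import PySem

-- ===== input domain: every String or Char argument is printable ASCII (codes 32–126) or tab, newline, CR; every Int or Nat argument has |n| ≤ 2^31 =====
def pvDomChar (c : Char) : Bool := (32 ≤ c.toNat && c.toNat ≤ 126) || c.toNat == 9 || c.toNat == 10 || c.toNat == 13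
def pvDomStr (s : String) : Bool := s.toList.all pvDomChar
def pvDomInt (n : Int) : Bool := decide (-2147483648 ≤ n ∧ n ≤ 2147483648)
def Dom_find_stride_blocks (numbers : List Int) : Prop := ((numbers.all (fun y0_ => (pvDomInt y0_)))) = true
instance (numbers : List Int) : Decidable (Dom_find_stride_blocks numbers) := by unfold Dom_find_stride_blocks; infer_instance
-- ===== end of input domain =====

-- B replaces A's single stateful scan by run-length encoding the consecutive differences and
-- then rebuilding the index blocks from the run lengths (objective: alternative decomposition;
-- same cost). Return-value equivalence is proved on lists of length ≥ 2 (A raises IndexError below that).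

-- ===== PORT A =====
-- loop body of A's for-loop: state = (blocks, start, stride)
def pvStepA (numbers : List Int) (acc : List (Int × Int × Int) × Int × Int) (i : Int) :
    List (Int × Int × Int) × Int × Int :=
  if PySem.List.pyGetD numbers i 0 - PySem.List.pyGetD numbers (i - 1) 0 ≠ acc.2.2 then
    (acc.1 ++ [(acc.2.1, i - 1, acc.2.2)], i,
      PySem.List.pyGetD numbers i 0 - PySem.List.pyGetD numbers (i - 1) 0)
  else acc

def find_stride_blocks (numbers : List Int) : List (Int × Int × Int) :=
  -- numbers[1] - numbers[0]: total via a default; Pre_ restricts to length ≥ 2 where Python returns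
  let stride := PySem.List.pyGetD numbers 1 0 - PySem.List.pyGetD numbers 0 0
  let st := (PySem.List.pyRange 1 (numbers.length : Int) 1).foldl (pvStepA numbers) ([], 0, stride)
  st.1 ++ [(st.2.1, (numbers.length : Int) - 1, st.2.2)]

-- ===== PORT B =====
-- phase-1 loop body: state = (finished runs, current run)
def pvStepB (numbers : List Int) (acc : List (Int × Int) × Option (Int × Int)) (j : Int) :
    List (Int × Int) × Option (Int × Int) :=
  let d := PySem.List.pyGetD numbers j 0 - PySem.List.pyGetD numbers (j - 1) 0
  match acc.2 with
  | some c => if c.1 = d then (acc.1, some (d, c.2 + 1)) else (acc.1 ++ [c], some (d, 1))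
  | none => (acc.1, some (d, 1))

-- phase-2 loop body: state = (blocks, pos)
def pvStep2 (acc : List (Int × Int × Int) × Int) (vr : Int × Int) :
    List (Int × Int × Int) × Int :=
  let s := if acc.1 = [] then (0 : Int) else acc.2
  (acc.1 ++ [(s, acc.2 + vr.2 - 1, vr.1)], acc.2 + vr.2)

def find_stride_blocks_alt (numbers : List Int) : List (Int × Int × Int) :=
  let st := (PySem.List.pyRange 1 (numbers.length : Int) 1).foldl (pvStepB numbers) ([], none)
  let runs := match st.2 with | some c => st.1 ++ [c] | none => st.1
  (runs.foldl pvStep2 ([], 1)).1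

-- ===== PRECONDITION & SPEC =====
-- Pre_ excludes exactly the inputs (length < 2) on which Python A raises IndexError at numbers[1] (or numbers[0]).
def Pre_find_stride_blocks (numbers : List Int) : Prop := 2 ≤ numbers.length
instance (numbers : List Int) : Decidable (Pre_find_stride_blocks numbers) := by
  unfold Pre_find_stride_blocks; infer_instance
def pvWitness_find_stride_blocks : List Int := [0, 1, 2]

-- On lists of fewer than two elements A raises IndexError while B returns the empty block list.
def Raises_find_stride_blocks (numbers : List Int) : Prop := numbers.length < 2
instance (numbers : List Int) : Decidable (Raises_find_stride_blocks numbers) := by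
  unfold Raises_find_stride_blocks; infer_instance
def pvRaiseWitness_find_stride_blocks : List Int := [7]
def pvRaiseWitnessOut_find_stride_blocks : List (Int × Int × Int) := []

def Spec_find_stride_blocks (numbers : List Int) (out : List (Int × Int × Int)) : Prop := out = find_stride_blocks_alt numbers
instance (numbers : List Int) (out : List (Int × Int × Int)) : Decidable (Spec_find_stride_blocks numbers out) := by unfold Spec_find_stride_blocks; infer_instance

-- ===== CLAIM (what is proved, stated in full; the proofs are below) =====
def Claim_equal_find_stride_blocks : Prop := ∀ (numbers : List Int), Dom_find_stride_blocks numbers → Pre_find_stride_blocks numbers → Spec_find_stride_blocks numbers (find_stride_blocks numbers)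
def Claim_raises_find_stride_blocks : Prop := (∀ (numbers : List Int), Dom_find_stride_blocks numbers → Raises_find_stride_blocks numbers → ¬ Pre_find_stride_blocks numbers) ∧ (Dom_find_stride_blocks (pvRaiseWitness_find_stride_blocks) ∧ Raises_find_stride_blocks (pvRaiseWitness_find_stride_blocks) ∧ find_stride_blocks_alt (pvRaiseWitness_find_stride_blocks) = pvRaiseWitnessOut_find_stride_blocks)

-- ===== LEMMAS AND PROOFS =====

-- the j-th consecutive difference
def pvD (numbers : List Int) (j : Int) : Int :=
  PySem.List.pyGetD numbers j 0 - PySem.List.pyGetD numbers (j - 1) 0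

-- joint invariant of A's scan, B's phase-1 scan and B's phase-2 reconstruction
theorem pv_inv (numbers : List Int) : ∀ m : ℕ, 1 ≤ m →
    ∃ blocks start stride runs c,
      (PySem.List.pyRange 1 ((m : Int) + 1) 1).foldl (pvStepA numbers) ([], 0, pvD numbers 1)
        = (blocks, start, stride) ∧
      (PySem.List.pyRange 1 ((m : Int) + 1) 1).foldl (pvStepB numbers) ([], none)
        = (runs, some (stride, c)) ∧
      (runs ++ [(stride, c)]).foldl pvStep2 ([], 1)
        = (blocks ++ [(start, (m : Int), stride)], (m : Int) + 1) := by
  intro m hm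
  induction m, hm using Nat.le_induction with
  | base =>
      have h12 : PySem.List.pyRange 1 2 1 = [1] := by decide
      refine ⟨[], 0, pvD numbers 1, [], 1, ?_, ?_, ?_⟩ <;>
        simp [h12, pvStepA, pvStepB, pvStep2, pvD]
  | succ m hm ih =>
      obtain ⟨blocks, start, stride, runs, c, hA, hB, h2⟩ := ih
      have hrange : PySem.List.pyRange 1 ((↑(m + 1) : Int) + 1) 1
          = PySem.List.pyRange 1 ((m : Int) + 1) 1 ++ [(m : Int) + 1] := by
        have h := PySem.List.pyRange_one_succ_right (a := 1) (b := (m : Int) + 1) (by omega)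
        push_cast
        exact h
      rw [hrange, List.foldl_append, List.foldl_append, hA, hB]
      by_cases hd : pvD numbers ((m : Int) + 1) = stride
      · -- the current run continues: same blocks, current run one longer
        obtain ⟨bl0, p0, hP⟩ : ∃ bl0 p0, runs.foldl pvStep2 ([], (1 : Int)) = (bl0, p0) :=
          ⟨_, _, rfl⟩
        rw [List.foldl_append, hP] at h2
        simp only [pvStep2, List.foldl_cons, List.foldl_nil, Prod.mk.injEq] at h2
        obtain ⟨hbl, hpos⟩ := h2
        obtain ⟨hbl0, hlast⟩ := List.append_inj' hbl (by simp)
        simp only [List.cons.injEq, Prod.mk.injEq, and_true] at hlast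
        obtain ⟨hs0, hend⟩ := hlast
        subst hbl0
        refine ⟨bl0, start, stride, runs, c + 1, ?_, ?_, ?_⟩
        · unfold pvD at hd
          simp at hd
          simp [pvStepA, hd]
        · unfold pvD at hd
          simp at hd
          simp [pvStepB, hd]
        · rw [List.foldl_append, hP]
          simp only [pvStep2, List.foldl_cons, List.foldl_nil, Prod.mk.injEq]
          refine ⟨?_, by push_cast; omega⟩
          rw [hs0]
          have h9 : p0 + (c + 1) - 1 = (↑(m + 1) : Int) := by push_cast; omega
          rw [h9]
      · -- the run breaks at index m+1: close the block, open a new run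
        refine ⟨blocks ++ [(start, (m : Int), stride)], (m : Int) + 1,
                pvD numbers ((m : Int) + 1), runs ++ [(stride, c)], 1, ?_, ?_, ?_⟩
        · unfold pvD at hd ⊢
          simp only [List.foldl_cons, List.foldl_nil, pvStepA, if_pos hd]
          have : (m : Int) + 1 - 1 = (m : Int) := by omega
          rw [this]
        · unfold pvD at hd
          simp at hd
          have hd' : ¬ stride = PySem.List.pyGetD numbers ((m : Int) + 1) 0 - numbers[m]?.getD 0 :=
            fun h => hd (Eq.symm h)
          simp [pvStepB, pvD, hd']
        · rw [List.foldl_append, h2]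
          simp only [pvStep2, List.foldl_cons, List.foldl_nil, Prod.mk.injEq,
            List.append_assoc]
          have hne : blocks ++ [(start, (m : Int), stride)] ≠ [] := by simp
          constructor
          · simp only [if_neg hne]
            have : (m : Int) + 1 + 1 - 1 = (↑(m + 1) : Int) := by push_cast; omega
            rw [this]
          · push_cast; omega

-- ===== VERDICT =====
theorem find_stride_blocks_spec : Claim_equal_find_stride_blocks := by
  intro numbers _ hpre
  unfold Pre_find_stride_blocks at hpre
  unfold Spec_find_stride_blocks
  obtain ⟨blocks, start, stride, runs, c, hA, hB, h2⟩ :=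
    pv_inv numbers (numbers.length - 1) (by omega)
  have hm1 : ((numbers.length - 1 : ℕ) : Int) = (numbers.length : Int) - 1 := by omega
  rw [hm1] at hA hB h2
  have hc : (numbers.length : Int) - 1 + 1 = (numbers.length : Int) := by ring
  rw [hc] at hA hB
  have h1 : pvD numbers 1 = PySem.List.pyGetD numbers 1 0 - PySem.List.pyGetD numbers 0 0 := by
    unfold pvD; norm_num
  rw [h1] at hA
  unfold find_stride_blocks find_stride_blocks_alt
  simp only [hA, hB, h2]
@[simp] theorem find_stride_blocks_raises : Claim_raises_find_stride_blocks := by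
  unfold Claim_raises_find_stride_blocks
  exact ⟨by intro n _ h; unfold Raises_find_stride_blocks Pre_find_stride_blocks at *; omega, by decide⟩
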